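-- pv_equiv track=rewrite | github.com/reimunyancat/baekjoon | python/31264.py | can_promote
-- ===== SOURCE A (Python) =====
-- def can_promote(skill, targets, m, a):
--     score = 0
--     for _ in range(m):
--         for target in targets:
--             if skill >= target:
--                 score += target
--                 skill += target
--                 break
--         if score >= a:
--             return True
--     return False
-- ===== SOURCE B (Python) =====
-- def can_promote(skill, targets, m, a):
--     score = 0
--     rounds = m
--     while rounds > 0:
--         # first affordable target, and the smallest still-locked target before it
--         t = None
--         gate = None
--         for x in targets:
--             if x <= skill:
--                 t = x
--                 break
--             if gate is None or x < gate:
--                 gate = x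
--         if t is None:
--             # nothing is affordable, so the state never changes again
--             return score >= a
--         if t <= 0:
--             # no growth from this pick: just play the round
--             skill += t
--             score += t
--             if score >= a:
--                 return True
--             rounds -= 1
--             continue
--         # the pick stays t until a locked target unlocks: jump the whole phase
--         need = max(1, -((score - a) // t))      # rounds to reach the threshold
--         if gate is None:
--             if need <= rounds:
--                 return True
--             k = rounds
--         else:
--             unlock = -((skill - gate) // t)     # rounds until gate unlocks
--             if need <= rounds and need <= unlock:
--                 return True
--             k = min(rounds, unlock)
--         skill += k * t
--         score += k * t
--         rounds -= k
--     return False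
-- ===== Notes on version B (the rewrite author's own statement) =====
-- stated objective: faster
-- what changed: B replaces A's round-by-round simulation (m iterations, each rescanning the target list) by phase jumps: while the first affordable target yields positive gain it computes by ceiling division how many rounds pass before the threshold is reached or an earlier target unlocks, and otherwise plays the single round as-is.
import Mathlib
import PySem

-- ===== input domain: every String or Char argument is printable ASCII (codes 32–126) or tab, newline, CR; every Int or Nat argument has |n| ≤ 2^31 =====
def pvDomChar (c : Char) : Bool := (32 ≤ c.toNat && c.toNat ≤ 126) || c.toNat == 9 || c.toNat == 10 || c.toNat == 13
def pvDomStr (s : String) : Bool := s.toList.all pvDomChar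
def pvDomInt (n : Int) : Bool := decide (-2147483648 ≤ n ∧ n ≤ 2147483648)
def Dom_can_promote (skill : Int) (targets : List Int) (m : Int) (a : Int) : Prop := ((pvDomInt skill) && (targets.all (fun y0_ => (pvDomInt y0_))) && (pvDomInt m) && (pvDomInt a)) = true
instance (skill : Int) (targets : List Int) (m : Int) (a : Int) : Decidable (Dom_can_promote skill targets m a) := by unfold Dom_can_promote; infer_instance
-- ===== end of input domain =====

-- B replaces A's round-by-round simulation by phase jumps when the chosen target
-- yields positive gain (rounds computed by ceiling division); otherwise it just
-- plays the round (objective: faster on growth phases).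


-- ===== PORT A =====
-- A's inner 'for target in targets: … break' as a helper: first target with skill >= target
def firstA (skill : Int) : List Int → Option Int
  | [] => none
  | t :: ts => if skill ≥ t then some t else firstA skill ts

-- A's outer 'for _ in range(m)' loop, fuel = remaining rounds
def loopA (skill score a : Int) (targets : List Int) : Nat → Bool
  | 0 => false
  | fuel + 1 =>
    match firstA skill targets with
    | some t =>
      if score + t ≥ a then true else loopA (skill + t) (score + t) a targets fuel
    | none => if score ≥ a then true else loopA skill score a targets fuel

def can_promote (skill : Int) (targets : List Int) (m : Int) (a : Int) : Bool :=
  loopA skill 0 a targets m.toNat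

-- ===== PORT B =====
-- first affordable target, and the smallest (still-locked) target of the prefix before it
def firstGate (skill : Int) : List Int → Option (Int × Option Int)
  | [] => none
  | x :: ts =>
    if x ≤ skill then some (x, none)
    else
      match firstGate skill ts with
      | none => none
      | some (t, none) => some (t, some x)
      | some (t, some g) => some (t, some (min x g))

-- -((p) // t) from Source B (Python floor division)
def negfd (p t : Int) : Int := -(PySem.Int.floordiv p t)

def loopB (skill score a : Int) (targets : List Int) : Nat → Bool
  | 0 => false
  | r + 1 =>
    match firstGate skill targets with
    | none => decide (score ≥ a)
    | some (t, gate) =>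
      if t ≤ 0 then
        -- no growth from this pick: just play the round
        if score + t ≥ a then true
        else loopB (skill + t) (score + t) a targets r
      else
        let need := max 1 (negfd (score - a) t)
        match gate with
        | none =>
          if need ≤ (r + 1 : Int) then true
          else loopB (skill + (r + 1 : Int) * t) (score + (r + 1 : Int) * t) a targets 0
        | some g =>
          let unlock := negfd (skill - g) t
          if need ≤ (r + 1 : Int) ∧ need ≤ unlock then true
          else
            -- max 1 is only a termination guard: gate > skill and t > 0 force unlock ≥ 1
            let k := min (r + 1) (max 1 unlock.toNat)
            loopB (skill + k * t) (score + k * t) a targets (r + 1 - k)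
  decreasing_by all_goals omega

def can_promote_alt (skill : Int) (targets : List Int) (m : Int) (a : Int) : Bool :=
  loopB skill 0 a targets m.toNat

-- ===== PRECONDITION & SPEC =====
def Spec_can_promote (skill : Int) (targets : List Int) (m : Int) (a : Int) (out : Bool) : Prop := out = can_promote_alt skill targets m a
instance (skill : Int) (targets : List Int) (m : Int) (a : Int) (out : Bool) : Decidable (Spec_can_promote skill targets m a out) := by unfold Spec_can_promote; infer_instance

-- ===== CLAIM (what is proved, stated in full; the proofs are below) =====
def Claim_equal_can_promote : Prop := ∀ (skill : Int) (targets : List Int) (m : Int) (a : Int), Dom_can_promote skill targets m a → Spec_can_promote skill targets m a (can_promote skill targets m a)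

-- ===== LEMMAS AND PROOFS =====

theorem fgate_none {s : Int} {ts : List Int} (h : firstGate s ts = none) :
    firstA s ts = none := by
  induction ts with
  | nil => rfl
  | cons x ts ih =>
    simp only [firstGate] at h
    simp only [firstA]
    split at h
    · exact absurd h (by simp)
    · rename_i hx
      rw [if_neg (by omega)]
      cases hft : firstGate s ts with
      | none => exact ih hft
      | some p =>
        rw [hft] at h
        rcases p with ⟨t, go⟩
        cases go <;> simp at h

theorem fgate_spec {s : Int} {ts : List Int} {t : Int} {go : Option Int}
    (h : firstGate s ts = some (t, go)) :
    t ≤ s ∧ (∀ g, go = some g → s < g) ∧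
    (∀ s', t ≤ s' → (∀ g, go = some g → s' < g) → firstA s' ts = some t) := by
  induction ts generalizing t go with
  | nil => simp [firstGate] at h
  | cons x ts ih =>
    simp only [firstGate] at h
    split at h
    · rename_i hx
      cases h
      refine ⟨hx, by simp, fun s' hs' _ => ?_⟩
      simp only [firstA]; rw [if_pos (by omega)]
    · rename_i hx
      cases hft : firstGate s ts with
      | none => rw [hft] at h; exact absurd h (by simp)
      | some p =>
        rw [hft] at h
        rcases p with ⟨u, go'⟩
        obtain ⟨hu, hg', hinv⟩ := ih hft
        cases go' with
        | none =>
          cases h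
          refine ⟨hu, ?_, fun s' hs' hgs => ?_⟩
          · intro g hg; cases hg; omega
          · have hxs' : ¬ (s' ≥ x) := by
              have := hgs x rfl; omega
            simp only [firstA, if_neg hxs']
            exact hinv s' hs' (by simp)
        | some g =>
          cases h
          have hsg : s < g := hg' g rfl
          refine ⟨hu, ?_, fun s' hs' hgs => ?_⟩
          · intro g'' hg''; cases hg''; omega
          · have hmin := hgs (min x g) rfl
            have hxs' : ¬ (s' ≥ x) := by omega
            simp only [firstA, if_neg hxs']
            exact hinv s' hs' (by intro g'' h''; cases h''; omega)

-- state never changes when no target is affordable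
theorem loopA_stuck_false {s score a : Int} {ts : List Int} (h : firstA s ts = none)
    (hlt : ¬ score ≥ a) : ∀ r : Nat, loopA s score a ts r = false := by
  intro r
  induction r with
  | zero => rfl
  | succ r ih => simp only [loopA, h]; rw [if_neg hlt]; exact ih

theorem loopA_stuck {s score a : Int} {ts : List Int} (h : firstA s ts = none)
    (r : Nat) : loopA s score a ts (r + 1) = decide (score ≥ a) := by
  by_cases hge : score ≥ a
  · simp [loopA, h, hge]
  · rw [loopA_stuck_false h hge]; simp [hge]

-- one immediate winning round
theorem loopA_hit {s score a t : Int} {ts : List Int} (h : firstA s ts = some t)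
    (hw : score + t ≥ a) (r : Nat) : loopA s score a ts (r + 1) = true := by
  simp [loopA, h, hw]

-- k identical-target, below-threshold rounds collapse into one bulk update
theorem loopA_bulk {a t : Int} {ts : List Int} :
    ∀ (k r : Nat) (s score : Int),
      (∀ j : Nat, j < k → firstA (s + (j : Int) * t) ts = some t) →
      (∀ j : Nat, j < k → score + ((j : Int) + 1) * t < a) →
      loopA s score a ts (k + r) = loopA (s + (k : Int) * t) (score + (k : Int) * t) a ts r := by
  intro k
  induction k with
  | zero => intro r s score _ _; simp
  | succ k ih =>
    intro r s score hf hs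
    have h0 := hf 0 (by omega)
    have hs0 := hs 0 (by omega)
    norm_num at h0 hs0
    have hstep : loopA s score a ts (k + 1 + r) = loopA (s + t) (score + t) a ts (k + r) := by
      have he : k + 1 + r = (k + r) + 1 := by omega
      rw [he]
      simp only [loopA, h0]
      rw [if_neg (by omega)]
    rw [hstep]
    have hf' : ∀ j : Nat, j < k → firstA ((s + t) + (j : Int) * t) ts = some t := by
      intro j hj
      have h := hf (j + 1) (by omega)
      have harg : (s + t) + (j : Int) * t = s + ((j + 1 : Nat) : Int) * t := by push_cast; ring
      rw [harg]; exact h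
    have hs' : ∀ j : Nat, j < k → (score + t) + ((j : Int) + 1) * t < a := by
      intro j hj
      have h := hs (j + 1) (by omega)
      push_cast at h
      ring_nf at h ⊢
      linarith
    rw [ih r (s + t) (score + t) hf' hs']
    have e1 : s + t + (k : Int) * t = s + ((k + 1 : Nat) : Int) * t := by push_cast; ring
    have e2 : score + t + (k : Int) * t = score + ((k + 1 : Nat) : Int) * t := by push_cast; ring
    rw [e1, e2]

-- ceiling-division brackets: (negfd (-p) t - 1) * t < p ≤ negfd (-p) t * t for 0 < t
theorem negfd_bracket {p t : Int} (ht : 0 < t) :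
    (negfd (-p) t - 1) * t < p ∧ p ≤ negfd (-p) t * t := by
  have := (PySem.Int.neg_floordiv_neg_eq_iff_of_pos (a := p) (b := t) ht).mp rfl
  exact this

theorem loopBA (a : Int) (ts : List Int) :
    ∀ (r : Nat) (s score : Int), loopB s score a ts r = loopA s score a ts r := by
  intro r
  induction r using Nat.strong_induction_on with
  | _ r ih =>
  intro s score
  cases r with
  | zero => simp only [loopB, loopA]
  | succ r =>
  cases hft : firstGate s ts with
  | none =>
    simp only [loopB, hft]
    exact (loopA_stuck (fgate_none hft) r).symm
  | some p =>
    rcases p with ⟨t, go⟩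
    obtain ⟨hts, hggt, hinv⟩ := fgate_spec hft
    have hfA : firstA s ts = some t := hinv s hts hggt
    by_cases htle : t ≤ 0
    · -- no growth: one plain round on both sides
      by_cases hwin : score + t ≥ a
      · simp only [loopB, hft, if_pos htle, if_pos hwin]
        exact (loopA_hit hfA hwin r).symm
      · simp only [loopB, hft, if_pos htle, if_neg hwin]
        rw [ih r (by omega) (s + t) (score + t)]
        simp only [loopA, hfA]
        rw [if_neg hwin]
    · -- positive target
      have htpos : 0 < t := by omega
      set c2 : Int := negfd (score - a) t with hc2
      set k2 : Int := max 1 c2 with hk2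
      obtain ⟨hc2lt, hc2ge⟩ := negfd_bracket (p := a - score) htpos
      have hc2e : negfd (-(a - score)) t = c2 := by
        rw [hc2]; norm_num [negfd]
      rw [hc2e] at hc2lt hc2ge
      have hk2ge : a ≤ score + k2 * t := by
        have : c2 * t ≤ k2 * t :=
          mul_le_mul_of_nonneg_right (le_max_right _ _) (by omega)
        omega
      have hk21 : 1 ≤ k2 := le_max_left _ _
      have hsc_lt : ∀ j : Int, 1 ≤ j → j ≤ k2 - 1 → score + j * t < a := by
        intro j hj1 hj2
        have hc2big : k2 = c2 := by
          rcases max_choice 1 c2 with h | h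
          · omega
          · omega
        have : j * t ≤ (c2 - 1) * t :=
          mul_le_mul_of_nonneg_right (by omega) (by omega)
        omega
      cases go with
      | none =>
        have hfall : ∀ j : Nat, firstA (s + (j : Int) * t) ts = some t := by
          intro j
          have : (0 : Int) ≤ (j : Int) * t :=
            mul_nonneg (Int.natCast_nonneg j) (by omega)
          exact hinv _ (by omega) (by simp)
        by_cases hr : k2 ≤ (r + 1 : Int)
        · simp only [loopB, hft, if_neg htle]
          rw [if_pos hr]
          set kk : Nat := (k2 - 1).toNat with hkk
          have hkkc : (kk : Int) = k2 - 1 := by omega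
          have hfuel : r + 1 = kk + (r + 1 - kk) := by omega
          conv_rhs => rw [hfuel]
          rw [loopA_bulk kk (r + 1 - kk) s score (fun j _ => hfall j)
            (fun j hj => hsc_lt ((j : Int) + 1) (by omega) (by omega))]
          have hrem : ∃ q : Nat, r + 1 - kk = q + 1 := ⟨r - kk, by omega⟩
          obtain ⟨q, hq⟩ := hrem
          rw [hq]
          have hw1 : (kk : Int) * t = k2 * t - t := by rw [hkkc]; ring
          have hwv : score + (kk : Int) * t + t ≥ a := by omega
          exact (loopA_hit (hfall kk) hwv q).symm
        · simp only [loopB, hft, if_neg htle]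
          rw [if_neg hr]
          have hfuel : r + 1 = (r + 1) + 0 := by omega
          conv_rhs => rw [hfuel]
          rw [loopA_bulk (r + 1) 0 s score (fun j _ => hfall j)
            (fun j hj => hsc_lt ((j : Int) + 1) (by omega) (by omega))]
          simp [loopA]
      | some g =>
        have hsg : s < g := hggt g rfl
        set c1 : Int := negfd (s - g) t with hc1
        obtain ⟨hc1lt, hc1ge⟩ := negfd_bracket (p := g - s) htpos
        have hc1e : negfd (-(g - s)) t = c1 := by
          rw [hc1]; norm_num [negfd]
        rw [hc1e] at hc1lt hc1ge
        have hc11 : 1 ≤ c1 := by nlinarith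
        have hf_lt : ∀ j : Int, 0 ≤ j → j ≤ c1 - 1 → firstA (s + j * t) ts = some t := by
          intro j hj0 hj1
          have hjt0 : 0 ≤ j * t := mul_nonneg hj0 (by omega)
          have : j * t ≤ (c1 - 1) * t :=
            mul_le_mul_of_nonneg_right (by omega) (by omega)
          refine hinv _ (by omega) ?_
          intro g'' hg''
          cases hg''
          omega
        by_cases hr : k2 ≤ (r + 1 : Int) ∧ k2 ≤ c1
        · simp only [loopB, hft, if_neg htle]
          rw [if_pos hr]
          set kk : Nat := (k2 - 1).toNat with hkk
          have hkkc : (kk : Int) = k2 - 1 := by omega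
          have hfuel : r + 1 = kk + (r + 1 - kk) := by omega
          conv_rhs => rw [hfuel]
          rw [loopA_bulk kk (r + 1 - kk) s score
            (fun j hj => hf_lt (j : Int) (by omega) (by omega))
            (fun j hj => hsc_lt ((j : Int) + 1) (by omega) (by omega))]
          have hrem : ∃ q : Nat, r + 1 - kk = q + 1 := ⟨r - kk, by omega⟩
          obtain ⟨q, hq⟩ := hrem
          rw [hq]
          have hw1 : (kk : Int) * t = k2 * t - t := by rw [hkkc]; ring
          have hwv : score + (kk : Int) * t + t ≥ a := by omega
          exact (loopA_hit (hf_lt (kk : Int) (by omega) (by omega)) hwv q).symm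
        · simp only [loopB, hft, if_neg htle]
          rw [if_neg hr]
          set k : Nat := min (r + 1) (max 1 c1.toNat) with hk
          have hmax : max 1 c1.toNat = c1.toNat := by omega
          have hk1' : 1 ≤ k := by omega
          have hkr : k ≤ r + 1 := min_le_left _ _
          have hkk1 : (k : Int) ≤ c1 := by
            have : k ≤ max 1 c1.toNat := min_le_right _ _
            omega
          have hkk2 : (k : Int) ≤ k2 - 1 := by
            rcases Decidable.em (k2 ≤ (r + 1 : Int)) with h | h
            · have h2 : ¬ k2 ≤ c1 := fun hb => hr ⟨h, hb⟩
              omega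
            · omega
          have hf : ∀ j : Nat, j < k → firstA (s + (j : Int) * t) ts = some t :=
            fun j hj => hf_lt (j : Int) (by omega) (by omega)
          have hs : ∀ j : Nat, j < k → score + ((j : Int) + 1) * t < a :=
            fun j hj => hsc_lt ((j : Int) + 1) (by omega) (by omega)
          have hfuel : r + 1 = k + (r + 1 - k) := by omega
          rw [ih (r + 1 - k) (by omega) (s + (k : Int) * t) (score + (k : Int) * t)]
          conv_rhs => rw [hfuel]
          rw [loopA_bulk k (r + 1 - k) s score hf hs]

-- ===== VERDICT (by name: the statement is the Claim_ definition above) =====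
theorem can_promote_spec : Claim_equal_can_promote := by
  intro skill targets m a _
  unfold Spec_can_promote can_promote can_promote_alt
  exact (loopBA a targets m.toNat skill 0).symm
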